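-- pv_equiv track=rewrite | github.com/avarya13/decision_making | task_1/task_1.py | find_siblings
-- ===== SOURCE A (Python) =====
-- def find_siblings(node, edges):
--     parent = find_parent(node, edges)
--     if parent is None:
--         return []  # No siblings if there is no parent
--     siblings = []
--     for p, child in edges:
--         if p == parent and child != node:
--             siblings.append(child)
--     return siblings
--
-- def find_parent(node, edges):
--     for parent, child in edges:
--         if child == node:
--             return parent
--     return None
-- ===== SOURCE B (Python) =====
-- def find_siblings(node, edges):
--     # c is a sibling of node iff they share a parent: some edge (p, c) exists
--     # with c != node and (p, node) also an edge.  No parent-finding stage.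
--     edge_set = set(edges)
--     return [c for p, c in edges if c != node and (p, node) in edge_set]
-- ===== Notes on version B (the rewrite author's own statement) =====
-- stated objective: alternative
-- what changed: Drops A's two-stage find-parent-then-scan-for-children decomposition: B uses the relational characterization 'c is a sibling of node iff c != node and (parent(c), node) is itself an edge', answered by one comprehension over edges with a set-membership test; Pre_ excludes inputs where node appears as a child under two distinct parents, on which A's first-match parent choice is accidental.
-- outside the precondition, e.g. on find_siblings(1, [(2, 1), (3, 1), (3, 4)]): A returns [], B returns [4]
import Mathlib
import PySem

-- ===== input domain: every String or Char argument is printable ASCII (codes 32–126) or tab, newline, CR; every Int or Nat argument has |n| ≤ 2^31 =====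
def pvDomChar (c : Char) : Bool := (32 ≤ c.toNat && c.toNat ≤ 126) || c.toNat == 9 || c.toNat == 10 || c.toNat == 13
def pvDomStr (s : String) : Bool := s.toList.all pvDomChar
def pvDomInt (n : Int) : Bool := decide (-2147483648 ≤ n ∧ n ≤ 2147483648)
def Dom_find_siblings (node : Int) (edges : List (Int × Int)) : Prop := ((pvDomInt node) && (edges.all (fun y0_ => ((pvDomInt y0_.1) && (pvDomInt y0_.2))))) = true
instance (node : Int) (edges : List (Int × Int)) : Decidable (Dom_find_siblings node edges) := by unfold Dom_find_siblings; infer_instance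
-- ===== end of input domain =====

-- B answers by the relational characterization "c is a sibling iff c != node and (parent-of-c, node) is itself an edge", one comprehension with a set-membership test, instead of A's find-parent-then-scan; Pre_ excludes multi-parent nodes, where A's first-match parent choice is accidental.


-- ===== PORT A =====
def find_parent (node : Int) (edges : List (Int × Int)) : Option Int :=
  match edges with
  | [] => none
  | (parent, child) :: rest => if child == node then some parent else find_parent node rest

def find_siblings (node : Int) (edges : List (Int × Int)) : List Int :=
  match find_parent node edges with
  | none => []
  | some parent =>
      edges.foldl (fun siblings e =>
        if e.1 == parent && e.2 != node then siblings ++ [e.2] else siblings) []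

-- ===== PORT B =====
def find_siblings_alt (node : Int) (edges : List (Int × Int)) : List Int :=
  let edge_set : PySem.Set (Int × Int) := PySem.Set.ofList edges
  (edges.filter (fun e => e.2 != node && PySem.Set.contains edge_set (e.1, node))).map (fun e => e.2)

-- ===== PRECONDITION & SPEC =====
-- Pre_ excludes inputs where node appears as a child under two distinct parents, on which
-- A's first-match parent choice is accidental (first-vs-last match on duplicate child keys).
def Pre_find_siblings (node : Int) (edges : List (Int × Int)) : Prop :=
  ∀ e ∈ edges, ∀ e' ∈ edges, e.2 = node → e'.2 = node → e.1 = e'.1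
instance (node : Int) (edges : List (Int × Int)) : Decidable (Pre_find_siblings node edges) := by unfold Pre_find_siblings; infer_instance

def pvWitness_find_siblings : Int × (List (Int × Int)) := (1, [(0, 1), (0, 2), (0, 3)])

def Spec_find_siblings (node : Int) (edges : List (Int × Int)) (out : List Int) : Prop := out = find_siblings_alt node edges
instance (node : Int) (edges : List (Int × Int)) (out : List Int) : Decidable (Spec_find_siblings node edges out) := by unfold Spec_find_siblings; infer_instance

-- ===== CLAIM (what is proved, stated in full; the proofs are below) =====
def Claim_equal_find_siblings : Prop := ∀ (node : Int) (edges : List (Int × Int)), Dom_find_siblings node edges → Pre_find_siblings node edges → Spec_find_siblings node edges (find_siblings node edges)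

-- ===== LEMMAS AND PROOFS =====

theorem find_parent_mem (node : Int) (edges : List (Int × Int)) (p : Int)
    (h : find_parent node edges = some p) : (p, node) ∈ edges := by
  induction edges with
  | nil => simp [find_parent] at h
  | cons e rest ih =>
    obtain ⟨q, c⟩ := e
    simp only [find_parent] at h
    by_cases hc : c = node
    · subst hc; simp at h; simp [h]
    · simp [hc] at h; exact List.mem_cons_of_mem _ (ih h)

theorem find_parent_none (node : Int) (edges : List (Int × Int))
    (h : find_parent node edges = none) : ∀ p : Int, (p, node) ∉ edges := by
  induction edges with
  | nil => simp
  | cons e rest ih =>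
    obtain ⟨q, c⟩ := e
    simp only [find_parent] at h
    by_cases hc : c = node
    · simp [hc] at h
    · simp only [beq_iff_eq, hc, if_false] at h
      intro p hp
      rcases List.mem_cons.mp hp with h1 | h1
      · injection h1 with _ h1b; exact hc h1b.symm
      · exact ih h p h1

-- ===== VERDICT (by name: the statement is the Claim_ definition above) =====
theorem find_siblings_spec : Claim_equal_find_siblings := by
  intro node edges _ hpre
  unfold Spec_find_siblings find_siblings find_siblings_alt
  cases hp : find_parent node edges with
  | none =>
    have hnone := find_parent_none node edges hp
    simp only []
    simp
    intro a b _ _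
    exact hnone a
  | some parent =>
    have hmem : (parent, node) ∈ edges := find_parent_mem node edges parent hp
    dsimp only
    rw [PySem.List.foldl_append_if (fun (e : Int × Int) => e.1 == parent && e.2 != node)
      (fun (e : Int × Int) => e.2)]
    rw [List.nil_append]
    refine congrArg (List.map _) (List.filter_congr ?_)
    intro e he
    by_cases hn : e.2 = node
    · simp [hn]
    · by_cases hpar : e.1 = parent
      · simp [hpar, hmem]
      · have hnotin : (e.1, node) ∉ edges := fun hmem' =>
          hpar (hpre (e.1, node) hmem' (parent, node) hmem rfl rfl)
        simp [hpar, hn, hnotin]
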